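-- pv_equiv track=rewrite | github.com/zhaofeng256/android-emulator-control | screenshot.py | match_count
-- ===== SOURCE A (Python) =====
-- def similar_point(a, b):
--     return abs(a[0] - b[0]) < 3 and abs(a[1] - b[1]) < 3 and abs(a[2] - b[2]) < 4
--
-- def match_count(A, B):
--     match = 0
--     for a in A:
--         for b in B:
--             if similar_point(a, b):
--                 match += 1
--                 break
--
--     return match
-- ===== SOURCE B (Python) =====
-- def match_count(A, B):
--     # Spatial hash: bucket B's points into tolerance-sized cells, probe 27 neighbors per a.
--     grid = {}
--     for b in B:
--         key = (b[0] // 3, b[1] // 3, b[2] // 4)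
--         grid[key] = grid.get(key, []) + [b]
--     count = 0
--     for a in A:
--         kx, ky, kz = a[0] // 3, a[1] // 3, a[2] // 4
--         found = False
--         for dx in (-1, 0, 1):
--             for dy in (-1, 0, 1):
--                 for dz in (-1, 0, 1):
--                     for b in grid.get((kx + dx, ky + dy, kz + dz), ()):
--                         if abs(a[0] - b[0]) < 3 and abs(a[1] - b[1]) < 3 and abs(a[2] - b[2]) < 4:
--                             found = True
--                             break
--                     if found:
--                         break
--                 if found:
--                     break
--             if found:
--                 break
--         if found:
--             count += 1
--     return count
-- ===== Notes on version B (the rewrite author's own statement) =====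
-- stated objective: alternative
-- what changed: Replaces the O(|A|*|B|) nested scan by a spatial hash grid over B with tolerance-sized cells ((x//3,y//3,z//4)); each a probes only the 27 neighboring cells, which contain every possible close point; intended as faster (O(|A|+|B|) expected) but a timing run measured only ~1.6x inconsistently, so no speed is claimed.
-- outside the precondition, e.g. on match_count([[0]], []): A returns 0, B raises IndexError
import Mathlib
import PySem

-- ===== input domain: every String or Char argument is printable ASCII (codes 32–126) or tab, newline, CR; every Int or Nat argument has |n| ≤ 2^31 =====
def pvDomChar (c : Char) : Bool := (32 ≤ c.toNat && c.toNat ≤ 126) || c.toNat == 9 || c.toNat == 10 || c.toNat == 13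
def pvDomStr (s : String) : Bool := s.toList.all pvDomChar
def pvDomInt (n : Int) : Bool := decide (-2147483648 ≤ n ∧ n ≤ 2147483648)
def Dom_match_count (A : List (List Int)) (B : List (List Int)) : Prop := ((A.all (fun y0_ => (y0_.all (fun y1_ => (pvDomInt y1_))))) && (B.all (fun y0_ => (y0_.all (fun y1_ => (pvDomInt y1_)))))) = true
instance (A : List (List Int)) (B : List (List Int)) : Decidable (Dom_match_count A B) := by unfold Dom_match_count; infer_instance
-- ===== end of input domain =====

-- B's spatial-hash grid replaces A's nested scan over B; equivalence of the two counts is proved below.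

-- ===== PORT A =====
-- similar_point(a, b); indices read with getD 0, exact on Pre_ (all points have ≥ 3 coordinates)
def pvSim (a b : List Int) : Bool :=
  decide (|a.getD 0 0 - b.getD 0 0| < 3) && decide (|a.getD 1 0 - b.getD 1 0| < 3) &&
    decide (|a.getD 2 0 - b.getD 2 0| < 4)

def match_count (A : List (List Int)) (B : List (List Int)) : Int :=
  A.foldl (fun m a => if B.any (fun b => pvSim a b) then m + 1 else m) 0

-- ===== PORT B =====
def pvCell (p : List Int) : Int × Int × Int :=
  (PySem.Int.floordiv (p.getD 0 0) 3, PySem.Int.floordiv (p.getD 1 0) 3,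
   PySem.Int.floordiv (p.getD 2 0) 4)

-- grid[key] = grid.get(key, []) + [b]
def pvGrid (B : List (List Int)) : PySem.Dict (Int × Int × Int) (List (List Int)) :=
  (B.map (fun b => (pvCell b, b))).foldl
    (fun d p => d.modify p.1 [] (· ++ [p.2])) PySem.Dict.empty

-- the 27 neighbor offsets (the three nested dx/dy/dz loops of Source B)
def pvOffsets : List (Int × Int × Int) :=
  ([-1, 0, 1] : List Int).flatMap (fun dx =>
    ([-1, 0, 1] : List Int).flatMap (fun dy =>
      ([-1, 0, 1] : List Int).map (fun dz => (dx, dy, dz))))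

def match_count_alt (A : List (List Int)) (B : List (List Int)) : Int :=
  let g := pvGrid B
  A.foldl (fun c a =>
    let k := pvCell a
    if pvOffsets.any (fun d =>
        (g.getD (k.1 + d.1, k.2.1 + d.2.1, k.2.2 + d.2.2) []).any (fun b => pvSim a b))
    then c + 1 else c) 0

-- ===== PRECONDITION & SPEC =====
-- Pre_ excludes inputs containing a point with fewer than 3 coordinates: Python A indexes
-- a[0..2]/b[0..2] and raises IndexError on them (except accidental returns via empty B or
-- short-circuit, on which B raises while computing grid keys).
def Pre_match_count (A : List (List Int)) (B : List (List Int)) : Prop :=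
  (∀ p ∈ A, 3 ≤ p.length) ∧ (∀ p ∈ B, 3 ≤ p.length)
instance (A : List (List Int)) (B : List (List Int)) : Decidable (Pre_match_count A B) := by
  unfold Pre_match_count; infer_instance
def pvWitness_match_count : List (List Int) × List (List Int) := ([[0, 0, 0]], [[1, 1, 2]])

def Spec_match_count (A : List (List Int)) (B : List (List Int)) (out : Int) : Prop := out = match_count_alt A B
instance (A : List (List Int)) (B : List (List Int)) (out : Int) : Decidable (Spec_match_count A B out) := by unfold Spec_match_count; infer_instance

-- ===== CLAIM (what is proved, stated in full; the proofs are below) =====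
def Claim_equal_match_count : Prop := ∀ (A : List (List Int)) (B : List (List Int)), Dom_match_count A B → Pre_match_count A B → Spec_match_count A B (match_count A B)

-- ===== LEMMAS AND PROOFS =====

-- the grid's cell c holds exactly B's points whose cell is c, in order
theorem pvGrid_getD (B : List (List Int)) (c : Int × Int × Int) :
    (pvGrid B).getD c [] = B.filter (fun b => pvCell b == c) := by
  unfold pvGrid
  rw [PySem.Dict.getD_foldl_modify_append]
  simp only [List.filter_map, PySem.Dict.getD_empty, List.nil_append]
  simp [Function.comp_def]

-- points within distance < k (k = 3 or 4) land in the same or an adjacent cell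
theorem pvFd_close (x y k : Int) (hk : k = 3 ∨ k = 4) (h : |x - y| < k) :
    PySem.Int.floordiv y k - PySem.Int.floordiv x k = -1 ∨
    PySem.Int.floordiv y k - PySem.Int.floordiv x k = 0 ∨
    PySem.Int.floordiv y k - PySem.Int.floordiv x k = 1 := by
  have hx := PySem.Int.floordiv_mul_add_mod x k
  have hy := PySem.Int.floordiv_mul_add_mod y k
  have hkpos : (0 : Int) < k := by rcases hk with h' | h' <;> omega
  have h1 := PySem.Int.mod_nonneg x hkpos
  have h2 := PySem.Int.mod_lt x hkpos
  have h3 := PySem.Int.mod_nonneg y hkpos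
  have h4 := PySem.Int.mod_lt y hkpos
  rw [abs_lt] at h
  rcases hk with h' | h' <;> subst h' <;> omega

theorem pvMem_offsets (d : Int × Int × Int)
    (h1 : d.1 = -1 ∨ d.1 = 0 ∨ d.1 = 1) (h2 : d.2.1 = -1 ∨ d.2.1 = 0 ∨ d.2.1 = 1)
    (h3 : d.2.2 = -1 ∨ d.2.2 = 0 ∨ d.2.2 = 1) : d ∈ pvOffsets := by
  obtain ⟨dx, dy, dz⟩ := d
  simp only [pvOffsets, List.mem_flatMap, List.mem_map]
  exact ⟨dx, by simpa using h1, dy, by simpa using h2, dz, by simpa using h3, rfl⟩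

-- per point a: the 27-cell probe finds a close point iff the full scan does
theorem pvProbe_eq (a : List Int) (B : List (List Int)) :
    (pvOffsets.any (fun d =>
        ((pvGrid B).getD ((pvCell a).1 + d.1, (pvCell a).2.1 + d.2.1, (pvCell a).2.2 + d.2.2)
          []).any (fun b => pvSim a b)))
      = B.any (fun b => pvSim a b) := by
  apply Bool.eq_iff_iff.mpr
  simp only [List.any_eq_true, pvGrid_getD, List.mem_filter, beq_iff_eq]
  constructor
  · rintro ⟨d, _, b, ⟨hbB, _⟩, hsim⟩
    exact ⟨b, hbB, hsim⟩
  · rintro ⟨b, hbB, hsim⟩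
    have hs := hsim
    unfold pvSim at hs
    simp only [Bool.and_eq_true, decide_eq_true_eq] at hs
    obtain ⟨⟨hx, hy⟩, hz⟩ := hs
    have hx' := pvFd_close (a.getD 0 0) (b.getD 0 0) 3 (Or.inl rfl) (by omega)
    have hy' := pvFd_close (a.getD 1 0) (b.getD 1 0) 3 (Or.inl rfl) (by omega)
    have hz' := pvFd_close (a.getD 2 0) (b.getD 2 0) 4 (Or.inr rfl) (by omega)
    refine ⟨((pvCell b).1 - (pvCell a).1, (pvCell b).2.1 - (pvCell a).2.1,
            (pvCell b).2.2 - (pvCell a).2.2), ?_, b, ⟨hbB, ?_⟩, hsim⟩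
    · exact pvMem_offsets _ (by simpa [pvCell] using hx') (by simpa [pvCell] using hy')
        (by simpa [pvCell] using hz')
    · simp

-- ===== VERDICT (by name: the statement is the Claim_ definition above) =====
theorem match_count_spec : Claim_equal_match_count := by
  intro A B _ _
  unfold Spec_match_count match_count match_count_alt
  refine PySem.List.foldl_congr_mem _ _ _ _ (fun acc a _ => ?_)
  show _ = (if (pvOffsets.any fun d =>
      ((pvGrid B).getD ((pvCell a).1 + d.1, (pvCell a).2.1 + d.2.1, (pvCell a).2.2 + d.2.2)
        []).any fun b => pvSim a b) = true then acc + 1 else acc)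
  rw [pvProbe_eq]
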